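-- pv_equiv track=rewrite | github.com/shivpandey02/CodePractice | vipul_codechef/SNAPCHAT.py | snapchat
-- ===== SOURCE A (Python) =====
-- def snapchat(chef,chefina,k):
--     count = 0
--     maximum = 0
--     for i in range(k):
--         if chef[i]!=0 and chefina[i]!=0:
--             count+=1
--             if maximum < count:
--                 maximum = count
--         else:
--             count = 0
--     return maximum
-- ===== SOURCE B (Python) =====
-- def snapchat(chef, chefina, k):
--     # Build the boolean "both nonzero" sequence first, then scan it run by run
--     # with two pointers, jumping over each maximal True-run at once.
--     b = [chef[i] != 0 and chefina[i] != 0 for i in range(k)]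
--     best = 0
--     i = 0
--     n = len(b)
--     while i < n:
--         if b[i]:
--             j = i
--             while j < n and b[j]:
--                 j += 1
--             if j - i > best:
--                 best = j - i
--             i = j
--         else:
--             i += 1
--     return best
-- ===== Notes on version B (the rewrite author's own statement) =====
-- stated objective: alternative
-- what changed: B first materialises the boolean both-nonzero sequence, then finds the longest True-run with a two-pointer scan that consumes each maximal run in an inner loop, instead of A's single pass with a running counter that is reset on zeros.
import Mathlib
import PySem

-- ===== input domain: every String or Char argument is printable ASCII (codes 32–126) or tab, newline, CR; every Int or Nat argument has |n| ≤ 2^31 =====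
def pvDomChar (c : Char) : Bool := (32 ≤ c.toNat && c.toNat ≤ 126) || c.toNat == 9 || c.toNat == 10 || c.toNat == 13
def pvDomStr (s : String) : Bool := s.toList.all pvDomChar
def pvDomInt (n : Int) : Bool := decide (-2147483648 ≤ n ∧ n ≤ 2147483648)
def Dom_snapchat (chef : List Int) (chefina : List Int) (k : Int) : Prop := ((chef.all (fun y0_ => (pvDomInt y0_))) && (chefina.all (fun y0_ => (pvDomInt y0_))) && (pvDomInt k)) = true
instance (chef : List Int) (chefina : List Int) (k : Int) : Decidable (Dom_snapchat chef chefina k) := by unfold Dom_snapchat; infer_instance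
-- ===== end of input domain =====

-- B materialises the boolean both-nonzero sequence and then finds the longest True-run
-- with a two-pointer scan that consumes each maximal run at once, instead of A's
-- running counter that is reset on zeros (objective: alternative decomposition).

-- ===== PORT A =====
def snapchat (chef : List Int) (chefina : List Int) (k : Int) : Int :=
  ((PySem.List.pyRange 0 k 1).foldl
    (fun (s : Int × Int) i =>
      if PySem.List.pyGetD chef i 0 ≠ 0 ∧ PySem.List.pyGetD chefina i 0 ≠ 0 then
        (s.1 + 1, if s.2 < s.1 + 1 then s.1 + 1 else s.2)
      else
        (0, s.2))
    (0, 0)).2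

-- ===== PORT B =====
-- inner while loop of Source B: consume the maximal True-run, counting it
def pvTakeRun : List Bool → Int → Int × List Bool
  | [], n => (n, [])
  | false :: t, n => (n, false :: t)
  | true :: t, n => pvTakeRun t (n + 1)

-- termination helper for pvScan (the port cites it by name)
theorem pvTakeRun_snd_length : ∀ (t : List Bool) (n : Int), (pvTakeRun t n).2.length ≤ t.length := by
  intro t
  induction t with
  | nil => intro n; simp [pvTakeRun]
  | cons h t ih =>
    intro n
    cases h
    · simp [pvTakeRun]
    · simp only [pvTakeRun, List.length_cons]
      exact le_trans (ih _) (Nat.le_succ _)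

-- outer while loop of Source B
def pvScan : List Bool → Int → Int
  | [], best => best
  | false :: t, best => pvScan t best
  | true :: t, best =>
      let p := pvTakeRun t 1
      pvScan p.2 (if p.1 > best then p.1 else best)
termination_by b _ => b.length
decreasing_by
  · simp
  · show (pvTakeRun t 1).2.length < t.length + 1
    exact Nat.lt_succ_of_le (pvTakeRun_snd_length t 1)

def snapchat_alt (chef : List Int) (chefina : List Int) (k : Int) : Int :=
  let b := (PySem.List.pyRange 0 k 1).map
    (fun i => decide (PySem.List.pyGetD chef i 0 ≠ 0) && decide (PySem.List.pyGetD chefina i 0 ≠ 0))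
  pvScan b 0

-- ===== PRECONDITION & SPEC =====
-- Pre_ excludes exactly the inputs on which Python A raises IndexError: k larger
-- than one of the list lengths.
def Pre_snapchat (chef : List Int) (chefina : List Int) (k : Int) : Prop :=
  k ≤ (chef.length : Int) ∧ k ≤ (chefina.length : Int)
instance (chef : List Int) (chefina : List Int) (k : Int) : Decidable (Pre_snapchat chef chefina k) := by unfold Pre_snapchat; infer_instance

def pvWitness_snapchat : List Int × List Int × Int := ([1, 2, 0, 3], [1, 1, 1, 1], 4)

def Spec_snapchat (chef : List Int) (chefina : List Int) (k : Int) (out : Int) : Prop := out = snapchat_alt chef chefina k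
instance (chef : List Int) (chefina : List Int) (k : Int) (out : Int) : Decidable (Spec_snapchat chef chefina k out) := by unfold Spec_snapchat; infer_instance

-- ===== CLAIM (what is proved, stated in full; the proofs are below) =====
def Claim_equal_snapchat : Prop := ∀ (chef : List Int) (chefina : List Int) (k : Int), Dom_snapchat chef chefina k → Pre_snapchat chef chefina k → Spec_snapchat chef chefina k (snapchat chef chefina k)

-- ===== LEMMAS AND PROOFS =====

-- A's loop body, on the boolean value of its condition
def pvStep (s : Int × Int) (b : Bool) : Int × Int :=
  if b then (s.1 + 1, if s.2 < s.1 + 1 then s.1 + 1 else s.2) else (0, s.2)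

theorem snapchat_eq_foldl_pvStep (chef chefina : List Int) (k : Int) :
    snapchat chef chefina k =
      (((PySem.List.pyRange 0 k 1).map
        (fun i => decide (PySem.List.pyGetD chef i 0 ≠ 0) && decide (PySem.List.pyGetD chefina i 0 ≠ 0))).foldl
        pvStep (0, 0)).2 := by
  unfold snapchat
  rw [List.foldl_map]
  have hfun : (fun (x : Int × Int) (y : Int) =>
      pvStep x (decide (PySem.List.pyGetD chef y 0 ≠ 0) && decide (PySem.List.pyGetD chefina y 0 ≠ 0)))
      = (fun (s : Int × Int) (i : Int) =>
        if PySem.List.pyGetD chef i 0 ≠ 0 ∧ PySem.List.pyGetD chefina i 0 ≠ 0 then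
          (s.1 + 1, if s.2 < s.1 + 1 then s.1 + 1 else s.2)
        else (0, s.2)) := by
    funext s i
    by_cases h1 : PySem.List.pyGetD chef i 0 ≠ 0 <;>
      by_cases h2 : PySem.List.pyGetD chefina i 0 ≠ 0 <;>
        simp [pvStep, h1, h2]
  rw [hfun]

theorem foldl_pvStep_all_true :
    ∀ (t : List Bool), (∀ x ∈ t, x = true) → ∀ (c m : Int),
      t.foldl pvStep (c, max m c) = (c + t.length, max m (c + t.length)) := by
  intro t
  induction t with
  | nil => intro _ c m; simp
  | cons h t ih =>
    intro hall c m
    have hh : h = true := hall h (List.mem_cons_self ..)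
    subst hh
    have hstep : pvStep (c, max m c) true = (c + 1, max m (c + 1)) := by
      simp only [pvStep, if_true, Prod.mk.injEq]
      exact ⟨trivial, by split_ifs <;> omega⟩
    rw [List.foldl_cons, hstep, ih (fun x hx => hall x (List.mem_cons_of_mem _ hx)) (c + 1) m]
    simp only [Prod.mk.injEq, List.length_cons]
    push_cast
    constructor <;> omega

theorem pvTakeRun_eq (t : List Bool) (n : Int) :
    pvTakeRun t n = (n + (t.takeWhile (fun x => x)).length, t.dropWhile (fun x => x)) := by
  induction t generalizing n with
  | nil => simp [pvTakeRun]
  | cons h t ih =>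
    cases h
    · simp [pvTakeRun, List.takeWhile, List.dropWhile]
    · simp only [pvTakeRun, List.takeWhile_cons, List.dropWhile_cons]
      rw [ih]
      simp
      omega

theorem pvMain : ∀ (n : Nat) (b : List Bool), b.length ≤ n → ∀ (best : Int),
    (b.foldl pvStep (0, best)).2 = pvScan b best := by
  intro n
  induction n with
  | zero =>
    intro b hb best
    have hnil : b = [] := List.eq_nil_of_length_eq_zero (Nat.le_zero.mp hb)
    subst hnil; simp [pvScan]
  | succ n ih =>
    intro b hb best
    match b with
    | [] => simp [pvScan]
    | false :: t =>
      have hf : pvStep (0, best) false = (0, best) := by simp [pvStep]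
      rw [List.foldl_cons, hf]
      have := ih t (by simpa using Nat.lt_succ_iff.mp (Nat.lt_of_lt_of_le (by simp) hb)) best
      simpa [pvScan] using this
    | true :: t =>
      have hlen : t.length ≤ n := by simpa using hb
      have hstep1 : pvStep (0, best) true = (1, max best 1) := by
        simp only [pvStep, if_true, Prod.mk.injEq]
        exact ⟨by omega, by split_ifs <;> omega⟩
      have hptrue : ∀ x ∈ t.takeWhile (fun x => x), x = true := fun x hx => by
        simpa using List.mem_takeWhile_imp hx
      have hhd := List.head?_dropWhile_not (p := fun x => x) (l := t)
      have hdlen : (t.dropWhile (fun x => x)).length ≤ t.length := t.length_dropWhile_le _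
      obtain ⟨L, hL⟩ : ∃ L : Nat, (t.takeWhile (fun x => x)).length = L := ⟨_, rfl⟩
      obtain ⟨r, hrr⟩ : ∃ r, t.dropWhile (fun x => x) = r := ⟨_, rfl⟩
      have hBleft : pvScan (true :: t) best = pvScan r (max best (1 + L)) := by
        simp only [pvScan, pvTakeRun_eq, hL, hrr]
        congr 1
        split_ifs <;> omega
      have hsplit : t = t.takeWhile (fun x => x) ++ r := by
        rw [← hrr]; exact (List.takeWhile_append_dropWhile).symm
      rw [List.foldl_cons, hstep1, hBleft]
      conv_lhs => rw [hsplit]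
      rw [List.foldl_append, foldl_pvStep_all_true _ hptrue 1 best, hL]
      rw [hrr] at hhd hdlen
      cases r with
      | nil => simp [pvScan]
      | cons hd r' =>
        cases hd with
        | true => simp at hhd
        | false =>
          have hf : pvStep (1 + (L : Int), max best (1 + L)) false = (0, max best (1 + L)) := by
            simp [pvStep]
          rw [List.foldl_cons, hf]
          have hr'len : r'.length ≤ n := by simp at hdlen; omega
          have := ih r' hr'len (max best (1 + L))
          simpa [pvScan] using this

-- ===== VERDICT (by name: the statement is the Claim_ definition above) =====
theorem snapchat_spec : Claim_equal_snapchat := by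
  intro chef chefina k _ _
  unfold Spec_snapchat snapchat_alt
  rw [snapchat_eq_foldl_pvStep]
  exact pvMain _ _ le_rfl 0
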